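-- pv_equiv track=rewrite | github.com/ktl014/MeToo | extract_locations.py | get_minimal_retweets_by_country
-- ===== SOURCE A (Python) =====
-- def get_minimal_retweets_by_country(retweets_by_country_dict):
--     minimal_retweets_by_country_dict = {}
--
--     minimal_retweets_by_country_dict["Other"] = retweets_by_country_dict.pop(
--         "unknown")
--
--     minimal_retweets_by_country_dict["United States"] = retweets_by_country_dict.pop(
--         "United States of America")
--
--     for country in retweets_by_country_dict:
--         retweet_cnt = retweets_by_country_dict[country]
--         if(retweet_cnt < 5000):
--             minimal_retweets_by_country_dict["Other"] += retweet_cnt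
--         else:
--             minimal_retweets_by_country_dict[country] = retweet_cnt
--
--     sorted_minimal_retweets_by_country = sorted(minimal_retweets_by_country_dict.items(),
--                                                 key=lambda kv: kv[1], reverse=True)
--     return sorted_minimal_retweets_by_country
-- ===== SOURCE B (Python) =====
-- def _place(entries, entry):
--     """Insert entry into a list sorted by count descending, before the first
--     element whose count is <= entry's (stable position for an earlier item)."""
--     i = 0
--     while i < len(entries) and entries[i][1] > entry[1]:
--         i += 1
--     return entries[:i] + [entry] + entries[i:]
--
--
-- def get_minimal_retweets_by_country(retweets_by_country_dict):
--     other = retweets_by_country_dict.pop("unknown")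
--     us = retweets_by_country_dict.pop("United States of America")
--     other += sum(v for v in retweets_by_country_dict.values() if v < 5000)
--     ranked = sorted(((c, v) for c, v in retweets_by_country_dict.items() if v >= 5000),
--                     key=lambda kv: kv[1], reverse=True)
--     return _place(_place(ranked, ("United States", us)), ("Other", other))
-- ===== Notes on version B (the rewrite author's own statement) =====
-- stated objective: alternative
-- what changed: instead of A's fused loop that builds a dict (accumulating 'Other' and inserting large countries) and then sorts the whole dict, B sums the small counts, sorts only the large entries, and splices the 'United States' and 'Other' buckets into that sorted list by ordered insertion - no output dict and no full sort
import Mathlib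
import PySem

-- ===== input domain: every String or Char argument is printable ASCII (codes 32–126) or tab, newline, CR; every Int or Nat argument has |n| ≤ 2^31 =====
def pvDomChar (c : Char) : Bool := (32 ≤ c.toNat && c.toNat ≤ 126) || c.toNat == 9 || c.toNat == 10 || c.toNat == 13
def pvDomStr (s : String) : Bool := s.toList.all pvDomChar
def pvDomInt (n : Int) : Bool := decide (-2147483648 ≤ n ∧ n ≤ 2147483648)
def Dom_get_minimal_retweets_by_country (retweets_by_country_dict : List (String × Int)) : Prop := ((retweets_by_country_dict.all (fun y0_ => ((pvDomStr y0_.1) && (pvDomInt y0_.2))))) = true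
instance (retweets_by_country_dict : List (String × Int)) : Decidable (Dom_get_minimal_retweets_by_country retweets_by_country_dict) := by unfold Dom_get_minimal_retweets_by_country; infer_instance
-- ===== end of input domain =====

-- B replaces A's fused dict-building loop + full sort by: sum the small counts, sort only the
-- large entries, and splice the two aggregate buckets into that sorted list by ordered insertion.
-- Both Pythons pop "unknown" and "United States of America" from the argument dict in place;
-- the equivalence proved here is about the RETURN value (B performs the same mutation).


-- ===== PORT A =====
-- the two `none` branches are Python's KeyError on the pops (excluded by Pre_);
-- Python's `for country in d: cnt = d[country]` over a dict is the fold over d.items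
-- (keys are unique inside Pre_).
def get_minimal_retweets_by_country (retweets_by_country_dict : List (String × Int)) : List (String × Int) :=
  match (PySem.Dict.mk retweets_by_country_dict).pop? "unknown" with
  | none => []
  | some (vu, d1) =>
    match d1.pop? "United States of America" with
    | none => []
    | some (vus, d2) =>
      let m0 := (PySem.Dict.empty.insert "Other" vu).insert "United States" vus
      let m := d2.items.foldl
        (fun m p => if p.2 < 5000 then m.insert "Other" (m.getD "Other" 0 + p.2)
                    else m.insert p.1 p.2) m0
      PySem.List.sorted m.items (fun kv => kv.2) true

-- ===== PORT B =====
-- Source B's _place: splice entry before the first element whose count is ≤ entry's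
-- (the while loop skipping strictly larger counts, written as the structural recursion)
def pvPlace (entries : List (String × Int)) (entry : String × Int) : List (String × Int) :=
  match entries with
  | [] => [entry]
  | p :: rest => if entry.2 < p.2 then p :: pvPlace rest entry else entry :: p :: rest

def get_minimal_retweets_by_country_alt (retweets_by_country_dict : List (String × Int)) : List (String × Int) :=
  match (PySem.Dict.mk retweets_by_country_dict).pop? "unknown" with
  | none => []
  | some (other0, d1) =>
    match d1.pop? "United States of America" with
    | none => []
    | some (us, d2) =>
      let other := other0 + ((d2.values.filter (fun v => decide (v < 5000))).sum)
      let ranked := PySem.List.sorted (d2.items.filter (fun p => decide (5000 ≤ p.2)))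
                      (fun kv => kv.2) true
      pvPlace (pvPlace ranked ("United States", us)) ("Other", other)

-- ===== PRECONDITION & SPEC =====
-- Pre_ excludes: inputs missing the keys "unknown" / "United States of America" (A raises
-- KeyError there); lists with duplicate keys, which are degenerate representations of a
-- Python dict (both programs receive a dict, where duplicates have already collapsed); and
-- inputs holding a country literally named "Other" or "United States" with ≥ 5000 retweets,
-- which collides with A's aggregate buckets of the same name — a corner where A's in-place
-- overwrite and B's duplicate entry are both accidental and neither value is specified.
def Pre_get_minimal_retweets_by_country (retweets_by_country_dict : List (String × Int)) : Prop :=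
  "unknown" ∈ retweets_by_country_dict.map Prod.fst ∧
  "United States of America" ∈ retweets_by_country_dict.map Prod.fst ∧
  (retweets_by_country_dict.map Prod.fst).Nodup ∧
  ∀ p ∈ retweets_by_country_dict, (p.1 = "Other" ∨ p.1 = "United States") → p.2 < 5000
instance (retweets_by_country_dict : List (String × Int)) : Decidable (Pre_get_minimal_retweets_by_country retweets_by_country_dict) := by unfold Pre_get_minimal_retweets_by_country; infer_instance

def pvWitness_get_minimal_retweets_by_country : (List (String × Int)) :=
  [("unknown", 120), ("United States of America", 9000), ("France", 6000), ("Chad", 3)]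

def Spec_get_minimal_retweets_by_country (retweets_by_country_dict : List (String × Int)) (out : List (String × Int)) : Prop := out = get_minimal_retweets_by_country_alt retweets_by_country_dict
instance (retweets_by_country_dict : List (String × Int)) (out : List (String × Int)) : Decidable (Spec_get_minimal_retweets_by_country retweets_by_country_dict out) := by unfold Spec_get_minimal_retweets_by_country; infer_instance

-- ===== CLAIM (what is proved, stated in full; the proofs are below) =====
def Claim_equal_get_minimal_retweets_by_country : Prop := ∀ (retweets_by_country_dict : List (String × Int)), Dom_get_minimal_retweets_by_country retweets_by_country_dict → Pre_get_minimal_retweets_by_country retweets_by_country_dict → Spec_get_minimal_retweets_by_country retweets_by_country_dict (get_minimal_retweets_by_country retweets_by_country_dict)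

-- ===== LEMMAS AND PROOFS =====

-- re-inserting the value a key already has (unique keys) is a no-op
theorem insert_getD_self_of_contains (d : PySem.Dict String Int)
    (k : String) (d0 : Int) (hn : d.keys.Nodup) (hc : d.contains k = true) :
    d.insert k (d.getD k d0) = d := by
  apply PySem.Dict.ext
  rw [PySem.Dict.items_insert_of_contains _ _ hc]
  conv_rhs => rw [← List.map_id d.items]
  refine List.map_congr_left (fun p hp => ?_)
  by_cases hk : p.1 = k
  · simp only [hk, beq_self_eq_true, if_pos]
    have : (k, p.2) ∈ d.items := by rw [← hk]; exact hp
    rw [PySem.Dict.getD_of_mem_items _ this hn]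
    simp [← hk]
  · simp [hk]

-- overwriting an already-present key commutes with inserting a different key
theorem insert_comm_of_contains (d : PySem.Dict String Int) (k k' : String) (v w : Int)
    (hc : d.contains k' = true) (hne : k ≠ k') :
    (d.insert k v).insert k' w = (d.insert k' w).insert k v := by
  apply PySem.Dict.ext
  have hc1 : (d.insert k v).contains k' = true := by
    rw [PySem.Dict.contains_insert]; simp [hc]
  rw [PySem.Dict.items_insert_of_contains _ _ hc1]
  by_cases hk : d.contains k = true
  · have hc2 : (d.insert k' w).contains k = true := by
      rw [PySem.Dict.contains_insert]; simp [hk]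
    rw [PySem.Dict.items_insert_of_contains _ _ hk,
        PySem.Dict.items_insert_of_contains _ _ hc2,
        PySem.Dict.items_insert_of_contains _ _ hc,
        List.map_map, List.map_map]
    refine List.map_congr_left (fun p _ => ?_)
    simp only [Function.comp_apply]
    by_cases h1 : p.1 = k <;> by_cases h2 : p.1 = k' <;>
      simp_all [Ne.symm hne]
  · have hk' : d.contains k = false := by simpa using hk
    have hc2 : (d.insert k' w).contains k = false := by
      rw [PySem.Dict.contains_insert]
      simp [hk', (by simpa using hne : (k == k') = false)]
    rw [PySem.Dict.items_insert_of_not_contains _ _ hk',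
        PySem.Dict.items_insert_of_not_contains _ _ hc2,
        PySem.Dict.items_insert_of_contains _ _ hc,
        List.map_append]
    simp [Ne.symm hne]
    exact hne

-- A's fused loop = bump "Other" by the small-count sum, then insert the large entries
theorem loop_eq (xs : List (String × Int)) (m : PySem.Dict String Int)
    (hc : m.contains "Other" = true) (hn : m.keys.Nodup)
    (hx : ∀ p ∈ xs, 5000 ≤ p.2 → p.1 ≠ "Other") :
    xs.foldl (fun m p => if p.2 < 5000 then m.insert "Other" (m.getD "Other" 0 + p.2)
                         else m.insert p.1 p.2) m
    = (xs.filter (fun p => decide (5000 ≤ p.2))).foldl (fun d p => d.insert p.1 p.2)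
        (m.insert "Other" (m.getD "Other" 0 +
          ((xs.filter (fun p => decide (p.2 < 5000))).map Prod.snd).sum)) := by
  induction xs generalizing m with
  | nil =>
    simp only [List.foldl_nil, List.filter_nil, List.map_nil, List.sum_nil, add_zero]
    exact (insert_getD_self_of_contains m "Other" 0 hn hc).symm
  | cons p xs ih =>
    by_cases hp : p.2 < 5000
    · have hfl : (decide (5000 ≤ p.2)) = false := by simpa using (by omega : ¬ 5000 ≤ p.2)
      simp only [List.foldl_cons, List.filter_cons, hfl, if_pos,
        Bool.false_eq_true, if_false, hp]
      rw [ih _ (by rw [PySem.Dict.contains_insert]; simp [hc]) (PySem.Dict.nodup_keys_insert _ _ _ hn)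
            (fun q hq hb => hx q (List.mem_cons_of_mem _ hq) hb)]
      rw [PySem.Dict.getD_insert_self, PySem.Dict.insert_insert_self]
      simp only [decide_true, if_true, List.map_cons, List.sum_cons, add_assoc]
    · have hp' : 5000 ≤ p.2 := by omega
      have hO : p.1 ≠ "Other" := hx p (List.mem_cons_self) hp'
      have hfs : (decide (p.2 < 5000)) = false := by simpa using hp
      have hfl : (decide (5000 ≤ p.2)) = true := by simpa using hp'
      simp only [List.foldl_cons, List.filter_cons, hfs, hfl, if_neg hp,
        Bool.false_eq_true, if_false, if_true]
      rw [ih _ (by rw [PySem.Dict.contains_insert]; simp [hc]) (PySem.Dict.nodup_keys_insert _ _ _ hn)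
            (fun q hq hb => hx q (List.mem_cons_of_mem _ hq) hb)]
      rw [PySem.Dict.getD_insert_of_ne _ _ _ (Ne.symm hO),
          insert_comm_of_contains m p.1 "Other" _ _ hc hO]

-- the "before" test PySem's insertion sort uses with key = snd, reverse=True
def pvIns (x : String × Int) (acc : List (String × Int)) : List (String × Int) :=
  PySem.List.insertBy (fun a b => decide (b.2 < a.2)) x acc

theorem place_cons_pos (c e : String × Int) (rest : List (String × Int)) (h : e.2 < c.2) :
    pvPlace (c :: rest) e = c :: pvPlace rest e := by simp [pvPlace, h]

theorem place_cons_neg (c e : String × Int) (rest : List (String × Int)) (h : ¬ e.2 < c.2) :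
    pvPlace (c :: rest) e = e :: c :: rest := by simp [pvPlace, h]

theorem ins_cons_pos (x c : String × Int) (ys : List (String × Int)) (h : c.2 < x.2) :
    pvIns x (c :: ys) = x :: c :: ys := by simp [pvIns, PySem.List.insertBy, h]

theorem ins_cons_neg (x c : String × Int) (ys : List (String × Int)) (h : ¬ c.2 < x.2) :
    pvIns x (c :: ys) = c :: pvIns x ys := by simp [pvIns, PySem.List.insertBy, h]

-- inserting a later element commutes with splicing an earlier one (ties: earlier goes first)
theorem ins_place_comm (x e : String × Int) (acc : List (String × Int)) :
    pvIns x (pvPlace acc e) = pvPlace (pvIns x acc) e := by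
  induction acc with
  | nil =>
    show pvIns x [e] = pvPlace [x] e
    by_cases h : e.2 < x.2
    · rw [ins_cons_pos _ _ _ h, place_cons_pos _ _ _ h]; rfl
    · rw [ins_cons_neg _ _ _ h, place_cons_neg _ _ _ h]; rfl
  | cons c rest ih =>
    by_cases h1 : e.2 < c.2 <;> by_cases h2 : c.2 < x.2
    · rw [place_cons_pos _ _ _ h1, ins_cons_pos _ _ _ h2, ins_cons_pos _ _ _ h2,
          place_cons_pos _ _ _ (by omega : e.2 < x.2), place_cons_pos _ _ _ h1]
    · rw [place_cons_pos _ _ _ h1, ins_cons_neg _ _ _ h2, ins_cons_neg _ _ _ h2,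
          place_cons_pos _ _ _ h1, ih]
    · by_cases h3 : e.2 < x.2
      · rw [place_cons_neg _ _ _ h1, ins_cons_pos _ _ _ h3, ins_cons_pos _ _ _ h2,
            place_cons_pos _ _ _ h3, place_cons_neg _ _ _ h1]
      · rw [place_cons_neg _ _ _ h1, ins_cons_neg _ _ _ h3, ins_cons_pos _ _ _ h2,
            place_cons_neg _ _ _ h3]
    · rw [place_cons_neg _ _ _ h1, ins_cons_neg _ _ _ (by omega : ¬ e.2 < x.2),
          ins_cons_neg _ _ _ h2, place_cons_neg _ _ _ h1]

theorem foldl_ins_place (xs : List (String × Int)) (e : String × Int)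
    (acc : List (String × Int)) :
    xs.foldl (fun acc x => pvIns x acc) (pvPlace acc e)
      = pvPlace (xs.foldl (fun acc x => pvIns x acc) acc) e := by
  induction xs generalizing acc with
  | nil => rfl
  | cons x xs ih => simp only [List.foldl_cons, ins_place_comm]; exact ih _

-- stable descending sort of a two-element prefix = sort the tail, splice the prefix back
theorem sorted_cons_cons (a b : String × Int) (l : List (String × Int)) :
    PySem.List.sorted (a :: b :: l) (fun kv => kv.2) true
      = pvPlace (pvPlace (PySem.List.sorted l (fun kv => kv.2) true) b) a := by
  rw [PySem.List.sorted_rev_eq_foldl_insertBy, PySem.List.sorted_rev_eq_foldl_insertBy]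
  show (b :: l).foldl (fun acc x => pvIns x acc) (pvIns a []) = _
  have h1 : pvIns a [] = pvPlace [] a := rfl
  rw [h1, foldl_ins_place]
  show pvPlace (l.foldl (fun acc x => pvIns x acc) (pvIns b [])) a = _
  have h2 : pvIns b [] = pvPlace [] b := rfl
  rw [h2, foldl_ins_place]
  simp only [pvIns]

theorem ports_agree (l : List (String × Int))
    (h1 : "unknown" ∈ l.map Prod.fst)
    (h2 : "United States of America" ∈ l.map Prod.fst)
    (hnd : (l.map Prod.fst).Nodup)
    (hO : ∀ p ∈ l, (p.1 = "Other" ∨ p.1 = "United States") → p.2 < 5000) :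
    get_minimal_retweets_by_country l = get_minimal_retweets_by_country_alt l := by
  have hu : "unknown" ∈ (PySem.Dict.mk l).keys := by
    simpa [PySem.Dict.keys] using h1
  cases hget : (PySem.Dict.mk l).get? "unknown" with
  | none => exact absurd hu ((PySem.Dict.get?_eq_none_iff_not_mem_keys _ _).mp hget)
  | some vu =>
  have hu2 : "United States of America" ∈ ((PySem.Dict.mk l).erase "unknown").keys := by
    simp only [PySem.Dict.keys, PySem.Dict.erase, List.mem_map]
    obtain ⟨p, hp, hpk⟩ := List.mem_map.mp h2
    exact ⟨p, List.mem_filter.mpr ⟨hp, by simp [hpk]⟩, hpk⟩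
  cases hget2 : ((PySem.Dict.mk l).erase "unknown").get? "United States of America" with
  | none => exact absurd hu2 ((PySem.Dict.get?_eq_none_iff_not_mem_keys _ _).mp hget2)
  | some vus =>
  unfold get_minimal_retweets_by_country get_minimal_retweets_by_country_alt
  simp only [PySem.Dict.pop?, hget, hget2, Option.map_some]
  set d2 := ((PySem.Dict.mk l).erase "unknown").erase "United States of America" with hd2
  have hmem : ∀ p ∈ d2.items, p ∈ l := by
    intro p hp
    have h := hp
    simp only [hd2, PySem.Dict.erase, List.mem_filter] at h
    exact h.1.1
  have hx : ∀ p ∈ d2.items, 5000 ≤ p.2 → p.1 ≠ "Other" := by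
    intro p hp hb hk
    exact absurd (hO p (hmem p hp) (Or.inl hk)) (by omega)
  have hxus : ∀ p ∈ d2.items, 5000 ≤ p.2 → p.1 ≠ "United States" := by
    intro p hp hb hk
    exact absurd (hO p (hmem p hp) (Or.inr hk)) (by omega)
  have hc : ((PySem.Dict.empty.insert "Other" vu).insert "United States" vus).contains "Other" = true := by
    rw [PySem.Dict.contains_insert]
    simp [PySem.Dict.contains_insert_self]
  have hn : ((PySem.Dict.empty.insert "Other" vu).insert "United States" vus).keys.Nodup :=
    PySem.Dict.nodup_keys_insert _ _ _ (PySem.Dict.nodup_keys_insert _ _ _ PySem.Dict.nodup_keys_empty)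
  rw [loop_eq _ _ hc hn hx]
  -- the base dict after the "Other" bump has exactly the two bucket items
  have hgd : ((PySem.Dict.empty.insert "Other" vu).insert "United States" vus).getD "Other" 0 = vu := by
    rw [PySem.Dict.getD_insert_of_ne _ _ _ (by decide), PySem.Dict.getD_insert_self]
  rw [hgd, insert_comm_of_contains _ "United States" "Other" _ _
        (PySem.Dict.contains_insert_self _ _ _) (by decide),
      PySem.Dict.insert_insert_self]
  set ot := vu + ((d2.items.filter (fun p => decide (p.2 < 5000))).map Prod.snd).sum with hot
  set Lg := d2.items.filter (fun p => decide (5000 ≤ p.2)) with hLg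
  have hLgmem : ∀ p ∈ Lg, p ∈ d2.items ∧ 5000 ≤ p.2 := by
    intro p hp
    have := List.mem_filter.mp hp
    exact ⟨this.1, by simpa using this.2⟩
  -- keys of the large entries are distinct and avoid both buckets
  have hd2nd : d2.keys.Nodup := by
    simp only [hd2, PySem.Dict.keys, PySem.Dict.erase]
    have : ∀ (s : String) (m : List (String × Int)), (m.map Prod.fst).Nodup →
        ((m.filter (fun p => !(p.1 == s))).map Prod.fst).Nodup := by
      intro s m hm
      exact (List.Sublist.map Prod.fst List.filter_sublist).nodup hm
    exact this _ _ (this _ _ (by simpa [PySem.Dict.keys] using hnd))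
  have hfresh : ∀ p ∈ Lg,
      ((PySem.Dict.empty.insert "Other" ot).insert "United States" vus).contains p.1 = false := by
    intro p hp
    obtain ⟨hpd, hp5⟩ := hLgmem p hp
    rw [PySem.Dict.contains_insert, PySem.Dict.contains_insert, PySem.Dict.contains_empty]
    have e1 : (p.1 == "United States") = false := by
      simpa using hxus p hpd hp5
    have e2 : (p.1 == "Other") = false := by
      simpa using hx p hpd hp5
    simp [e1, e2]
  have hLgnd : (Lg.map Prod.fst).Nodup := by
    exact (List.Sublist.map Prod.fst List.filter_sublist).nodup
      (by simpa [PySem.Dict.keys] using hd2nd)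
  have hitems := PySem.Dict.items_foldl_insert_fresh Lg Prod.fst Prod.snd
    ((PySem.Dict.empty.insert "Other" ot).insert "United States" vus) hfresh hLgnd
  have hfold : (Lg.foldl (fun d p => d.insert p.1 p.2)
      ((PySem.Dict.empty.insert "Other" ot).insert "United States" vus)).items
      = ("Other", ot) :: ("United States", vus) :: Lg := by
    have hbase : ((PySem.Dict.empty.insert "Other" ot).insert "United States" vus).items
        = [("Other", ot), ("United States", vus)] := by
      rw [PySem.Dict.items_insert_of_not_contains _ _
            (by simp [PySem.Dict.contains_insert, PySem.Dict.contains_empty]),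
          PySem.Dict.items_insert_of_not_contains _ _ (PySem.Dict.contains_empty _)]
      rfl
    calc (Lg.foldl (fun d p => d.insert p.1 p.2)
            ((PySem.Dict.empty.insert "Other" ot).insert "United States" vus)).items
        = ((PySem.Dict.empty.insert "Other" ot).insert "United States" vus).items
            ++ Lg.map (fun p => (p.1, p.2)) := hitems
      _ = ("Other", ot) :: ("United States", vus) :: Lg := by
            rw [hbase]; simp
  rw [hfold, sorted_cons_cons]
  -- Source B's sum over values = sum over the snd of the filtered items
  have hsum : (d2.values.filter (fun v => decide (v < 5000))).sum
      = ((d2.items.filter (fun p => decide (p.2 < 5000))).map Prod.snd).sum := by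
    simp only [PySem.Dict.values, List.filter_map]
    rfl
  rw [hsum]

-- ===== VERDICT (by name: the statement is the Claim_ definition above) =====
theorem get_minimal_retweets_by_country_spec : Claim_equal_get_minimal_retweets_by_country := by
  intro l _ hpre
  unfold Spec_get_minimal_retweets_by_country
  exact ports_agree l hpre.1 hpre.2.1 hpre.2.2.1 hpre.2.2.2
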